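-- pv_equiv track=rewrite | github.com/kodcdangky/Advent-of-Code | 2021/Advent-of-Code-2021-D8/main2.py | elim
-- ===== SOURCE A (Python) =====
-- def elim(mstr, s):
--     main_string = [c for c in mstr]
--     for c in s:
--         try:
--             main_string.remove(c)
--         except:
--             pass
--     ms = ""
--     for st in main_string:
--         ms += st
--     return ms
-- ===== SOURCE B (Python) =====
-- def elim(mstr, s):
--     need = {}
--     for c in s:
--         need[c] = need.get(c, 0) + 1
--     out = []
--     for c in mstr:
--         if need.get(c, 0) > 0:
--             need[c] = need[c] - 1
--         else:
--             out.append(c)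
--     return "".join(out)
-- ===== Notes on version B (the rewrite author's own statement) =====
-- stated objective: faster
-- what changed: Instead of calling list.remove (a linear scan) once per character of s, B builds a count dictionary of s in one pass and then makes a single pass over mstr, skipping a character while its count is positive.
import Mathlib
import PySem

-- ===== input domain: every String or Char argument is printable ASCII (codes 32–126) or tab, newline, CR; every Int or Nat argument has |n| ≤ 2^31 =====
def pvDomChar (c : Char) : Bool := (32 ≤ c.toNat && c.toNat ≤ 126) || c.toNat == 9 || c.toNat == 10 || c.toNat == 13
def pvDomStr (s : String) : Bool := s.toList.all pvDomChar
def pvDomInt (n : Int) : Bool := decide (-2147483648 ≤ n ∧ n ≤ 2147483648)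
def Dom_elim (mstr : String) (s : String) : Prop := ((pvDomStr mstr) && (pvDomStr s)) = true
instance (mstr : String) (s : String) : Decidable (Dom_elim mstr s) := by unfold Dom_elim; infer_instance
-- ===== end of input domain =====

-- B removes the same characters in one pass over mstr using a count dictionary of s,
-- instead of A's per-character list.remove scan; the return value is identical.

-- ===== PORT A =====
-- `main_string.remove(c)` inside try/except: remove first occurrence, or leave unchanged (ValueError swallowed).
def elimRemStep (ms : List Char) (c : Char) : List Char :=
  match PySem.List.remove? ms c with
  | some l => l
  | none => ms

def elim (mstr : String) (s : String) : String :=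
  let main_string := mstr.toList
  let main_string := s.toList.foldl elimRemStep main_string
  -- ms = ""; for st in main_string: ms += st
  main_string.foldl (fun ms st => ms.push st) ""

-- ===== PORT B =====
def elim_alt (mstr : String) (s : String) : String :=
  -- need = {}; for c in s: need[c] = need.get(c, 0) + 1
  let need : PySem.Dict Char Int :=
    s.toList.foldl (fun d c => d.insert c (d.getD c 0 + 1)) PySem.Dict.empty
  -- out = []; for c in mstr: if need.get(c,0) > 0: need[c] = need[c] - 1 else: out.append(c)
  let st := mstr.toList.foldl
    (fun (st : PySem.Dict Char Int × List Char) c =>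
      if st.1.getD c 0 > 0 then (st.1.insert c (st.1.getD c 0 - 1), st.2)
      else (st.1, st.2 ++ [c]))
    (need, [])
  -- "".join(out): out holds the single characters, joined back into a string
  String.ofList st.2

-- ===== PRECONDITION & SPEC =====
def Spec_elim (mstr : String) (s : String) (out : String) : Prop := out = elim_alt mstr s
instance (mstr : String) (s : String) (out : String) : Decidable (Spec_elim mstr s out) := by unfold Spec_elim; infer_instance

-- ===== CLAIM (what is proved, stated in full; the proofs are below) =====
def Claim_equal_elim : Prop := ∀ (mstr : String) (s : String), Dom_elim mstr s → Spec_elim mstr s (elim mstr s)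

-- ===== LEMMAS AND PROOFS =====

-- the pure-function form of B's filtering pass: skip a char while its count is positive
def passF : List Char → (Char → Int) → List Char
  | [], _ => []
  | c :: ms, cnt =>
      if cnt c > 0 then passF ms (fun x => if x = c then cnt x - 1 else cnt x)
      else c :: passF ms cnt

theorem elimRemStep_cons_self (ms : List Char) (c : Char) :
    elimRemStep (c :: ms) c = ms := by
  simp [elimRemStep]

theorem elimRemStep_cons_of_ne (ms : List Char) (d c : Char) (h : d ≠ c) :
    elimRemStep (d :: ms) c = d :: elimRemStep ms c := by
  simp only [elimRemStep, PySem.List.remove?_cons_of_ne ms h]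
  cases PySem.List.remove? ms c <;> rfl

theorem passF_zero (ms : List Char) (cnt : Char → Int) (h : ∀ x, cnt x ≤ 0) :
    passF ms cnt = ms := by
  induction ms with
  | nil => rfl
  | cons d ms ih =>
      rw [passF, if_neg (show ¬ cnt d > 0 by have := h d; omega), ih]

-- key lemma: bumping the count of c by one = removing the first occurrence of c first
theorem passF_bump (ms : List Char) (cnt : Char → Int) (c : Char)
    (hnn : ∀ x, 0 ≤ cnt x) :
    passF ms (fun x => if x = c then cnt x + 1 else cnt x) = passF (elimRemStep ms c) cnt := by
  induction ms generalizing cnt with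
  | nil => rfl
  | cons d ms ih =>
      by_cases hd : d = c
      · subst hd
        rw [elimRemStep_cons_self, passF]
        simp only [if_true]
        rw [if_pos (show cnt d + 1 > 0 by have := hnn d; omega)]
        have hfn : (fun x => if x = d then (if x = d then cnt x + 1 else cnt x) - 1
                      else if x = d then cnt x + 1 else cnt x) = cnt := by
          funext x
          by_cases hx : x = d <;> simp [hx]
        rw [hfn]
      · rw [elimRemStep_cons_of_ne ms d c hd, passF, passF]
        simp only [if_neg hd]
        by_cases hpos : cnt d > 0
        · rw [if_pos hpos, if_pos hpos]
          have hfn : (fun x => if x = d then (if x = c then cnt x + 1 else cnt x) - 1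
                        else if x = c then cnt x + 1 else cnt x)
              = (fun x => if x = c then (if x = d then cnt x - 1 else cnt x) + 1
                        else (if x = d then cnt x - 1 else cnt x)) := by
            funext x
            by_cases hx : x = d
            · subst hx; simp [hd]
            · by_cases hxc : x = c <;> simp [hx, hxc, Ne.symm hd]
          rw [hfn]
          exact ih _ (fun x => by by_cases hx : x = d <;> simp [hx] <;> [omega; exact hnn x])
        · rw [if_neg hpos, if_neg hpos]
          exact congrArg _ (ih cnt hnn)

-- A's fold of first-occurrence removals = B's counted single pass
theorem foldl_remStep_eq_passF (cs : List Char) : ∀ ms : List Char,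
    cs.foldl elimRemStep ms = passF ms (fun x => (cs.count x : Int)) := by
  induction cs with
  | nil => exact fun ms => (passF_zero ms _ (fun x => by simp)).symm
  | cons c cs ih =>
      intro ms
      simp only [List.foldl_cons]
      rw [ih (elimRemStep ms c),
        ← passF_bump ms (fun x => (cs.count x : Int)) c (fun x => by positivity)]
      congr 1
      funext x
      simp only [List.count_cons]
      by_cases hx : x = c
      · simp [hx]
      · simp [hx, Ne.symm hx]

-- B's dict pass, projected onto its output list, is passF of the dict's count function
theorem foldl_dict_pass (ms : List Char) (d : PySem.Dict Char Int) (acc : List Char) :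
    (ms.foldl
      (fun (st : PySem.Dict Char Int × List Char) c =>
        if st.1.getD c 0 > 0 then (st.1.insert c (st.1.getD c 0 - 1), st.2)
        else (st.1, st.2 ++ [c]))
      (d, acc)).2 = acc ++ passF ms (fun x => d.getD x 0) := by
  induction ms generalizing d acc with
  | nil => simp [passF]
  | cons c ms ih =>
      rw [List.foldl_cons, passF]
      by_cases h : d.getD c 0 > 0
      · rw [if_pos h, if_pos h, ih]
        have hfn : (fun x => (d.insert c (d.getD c 0 - 1)).getD x 0)
            = (fun x => if x = c then d.getD x 0 - 1 else d.getD x 0) := by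
          funext x
          by_cases hx : x = c <;> simp [PySem.Dict.getD_insert, hx]
        rw [hfn]
      · rw [if_neg h, if_neg h, ih]
        simp

-- A's string-building loop produces String.ofList of the character list
theorem foldl_push_eq_ofList (l : List Char) : ∀ acc : String,
    l.foldl (fun ms st => ms.push st) acc = acc ++ String.ofList l := by
  induction l with
  | nil => intro acc; apply String.toList_injective; simp
  | cons c l ih =>
      intro acc
      rw [List.foldl_cons, ih]
      apply String.toList_injective
      simp

-- ===== VERDICT (by name: the statement is the Claim_ definition above) =====
theorem elim_spec : Claim_equal_elim := by
  intro mstr s _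
  show elim mstr s = elim_alt mstr s
  simp only [elim, elim_alt]
  rw [foldl_dict_pass, foldl_remStep_eq_passF, foldl_push_eq_ofList]
  have hc : (fun x => ((s.toList.foldl (fun d c => d.insert c (d.getD c 0 + 1))
      PySem.Dict.empty).getD x 0)) = fun x => (s.toList.count x : Int) := by
    funext x
    rw [PySem.Dict.foldl_insert_getD_add_one_eq_counter, PySem.Dict.getD_counter]
  rw [hc]
  apply String.toList_injective
  simp
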